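-- pv_equiv track=rewrite | github.com/damaoooo/plc_test | PreProcessor/DataGenerator.py | filter_bad_dataset
-- ===== SOURCE A (Python) =====
-- def filter_bad_dataset(all_data: dict):
--     bad_index = []
--     bad_funtion = []
--     for binary in all_data:
--         for function in all_data[binary]:
--             if len(all_data[binary][function]) < 2:
--                 bad_funtion.append((binary, function))
--
--     for binary, function in bad_funtion:
--         for function_body in all_data[binary][function]:
--             bad_index.append(function_body['index'])
--         del all_data[binary][function]
--
--     bad_binary = []
--     for binary in all_data:
--         if len(all_data[binary]) < 2:
--             bad_binary.append(binary)
--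
--     for binary in bad_binary:
--
--         for function in all_data[binary]:
--             for function_body in all_data[binary][function]:
--                 bad_index.append(function_body['index'])
--
--         del all_data[binary]
--
--     bad_index = sorted(list(set(bad_index)), reverse=True)
--
--     return all_data, bad_index
-- ===== SOURCE B (Python) =====
-- def filter_bad_dataset(all_data: dict):
--     # One fused pass per binary (instead of A's four global phases), collecting
--     # removed indices into a set from the start.  Mutates all_data in place like A.
--     bad_index = set()
--     for binary, functions in list(all_data.items()):
--         for function, bodies in list(functions.items()):
--             if len(bodies) < 2:
--                 bad_index.update(body['index'] for body in bodies)
--                 del functions[function]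
--         if len(functions) < 2:
--             for bodies in functions.values():
--                 bad_index.update(body['index'] for body in bodies)
--             del all_data[binary]
--     return all_data, sorted(bad_index, reverse=True)
-- ===== Notes on version B (the rewrite author's own statement) =====
-- stated objective: simpler
-- what changed: A's four global phases (collect bad functions, delete them and gather indices, collect bad binaries, delete them and gather indices, then dedup+sort a list) are fused into one pass per binary that deletes sparse functions and then the binary itself if it became sparse, accumulating removed indices directly into a set.
import Mathlib
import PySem

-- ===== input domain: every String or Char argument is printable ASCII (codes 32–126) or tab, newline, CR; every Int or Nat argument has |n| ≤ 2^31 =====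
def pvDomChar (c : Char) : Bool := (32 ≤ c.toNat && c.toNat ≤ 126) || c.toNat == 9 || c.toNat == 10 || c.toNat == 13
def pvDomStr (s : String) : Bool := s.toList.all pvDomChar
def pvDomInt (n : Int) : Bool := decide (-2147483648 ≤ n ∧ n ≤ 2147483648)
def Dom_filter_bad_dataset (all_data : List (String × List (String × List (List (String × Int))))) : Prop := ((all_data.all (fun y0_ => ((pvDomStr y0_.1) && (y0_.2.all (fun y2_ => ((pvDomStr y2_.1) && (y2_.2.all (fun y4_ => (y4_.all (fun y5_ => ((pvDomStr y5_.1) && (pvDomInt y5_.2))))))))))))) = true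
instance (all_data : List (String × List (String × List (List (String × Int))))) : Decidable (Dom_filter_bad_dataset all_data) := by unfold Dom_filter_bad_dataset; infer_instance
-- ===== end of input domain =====

-- B fuses A's four global phases into one pass per binary (objective: simpler).
-- Both Pythons mutate the argument dict in place identically; the theorems are about the return value.

-- ===== PORT A =====
-- body['index'] ; Pre_ guarantees the key is present wherever either Python evaluates this
def pvIdx (body : List (String × Int)) : Int := (PySem.Dict.mk body).getD "index" 0

-- loop body of A's second phase: collect the bad function's indices, then del all_data[binary][function]
def pvPhase2Step (st : (List (String × List (String × List (List (String × Int))))) × List Int)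
    (bf : String × String) : (List (String × List (String × List (List (String × Int))))) × List Int :=
  let funcs := (PySem.Dict.mk st.1).getD bf.1 []
  let bad := ((PySem.Dict.mk funcs).getD bf.2 []).foldl (fun acc body => acc ++ [pvIdx body]) st.2
  (((PySem.Dict.mk st.1).insert bf.1 ((PySem.Dict.mk funcs).erase bf.2).items).items, bad)

-- loop body of A's fourth phase: collect all of the bad binary's indices, then del all_data[binary]
def pvPhase4Step (st : (List (String × List (String × List (List (String × Int))))) × List Int)
    (b : String) : (List (String × List (String × List (List (String × Int))))) × List Int :=
  let funcs := (PySem.Dict.mk st.1).getD b []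
  let bad := funcs.foldl (fun acc q => q.2.foldl (fun acc body => acc ++ [pvIdx body]) acc) st.2
  (((PySem.Dict.mk st.1).erase b).items, bad)

def filter_bad_dataset (all_data : List (String × List (String × List (List (String × Int))))) : (List (String × List (String × List (List (String × Int))))) × List Int :=
  let bad_funtion : List (String × String) :=
    all_data.foldl (fun acc p =>
      p.2.foldl (fun acc q => if q.2.length < 2 then acc ++ [(p.1, q.1)] else acc) acc) []
  let st1 := bad_funtion.foldl pvPhase2Step (all_data, [])
  let bad_binary : List String :=
    st1.1.foldl (fun acc p => if p.2.length < 2 then acc ++ [p.1] else acc) []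
  let st2 := bad_binary.foldl pvPhase4Step st1
  (st2.1, PySem.List.sorted (PySem.Set.ofList st2.2) (fun x => x) true)

-- ===== PORT B =====
-- bad_index.update(body['index'] for body in bodies)
def pvAddIdxs (s : PySem.Set Int) (bodies : List (List (String × Int))) : PySem.Set Int :=
  bodies.foldl (fun s body => PySem.Set.add s (pvIdx body)) s

-- B's inner loop body: delete a sparse function, collecting its indices into the set
def pvAltInnerStep (st2 : (List (String × List (List (String × Int)))) × PySem.Set Int)
    (q : String × List (List (String × Int))) : (List (String × List (List (String × Int)))) × PySem.Set Int :=
  if q.2.length < 2 then (((PySem.Dict.mk st2.1).erase q.1).items, pvAddIdxs st2.2 q.2) else st2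

-- B's outer loop body: prune one binary's functions, then drop the binary if it became sparse
-- (the insert overwrites in place: it models Python's aliasing of the mutated inner dict)
def pvAltStep (st : (List (String × List (String × List (List (String × Int))))) × PySem.Set Int)
    (p : String × List (String × List (List (String × Int)))) :
    (List (String × List (String × List (List (String × Int))))) × PySem.Set Int :=
  let inner := p.2.foldl pvAltInnerStep (p.2, st.2)
  if inner.1.length < 2 then
    (((PySem.Dict.mk st.1).erase p.1).items, inner.1.foldl (fun s q => pvAddIdxs s q.2) inner.2)
  else (((PySem.Dict.mk st.1).insert p.1 inner.1).items, inner.2)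

def filter_bad_dataset_alt (all_data : List (String × List (String × List (List (String × Int))))) : (List (String × List (String × List (List (String × Int))))) × List Int :=
  let st := all_data.foldl pvAltStep (all_data, PySem.Set.empty)
  (st.1, PySem.List.sorted st.2 (fun x => x) true)

-- ===== PRECONDITION & SPEC =====
-- Pre_ excludes (a) inputs on which A raises KeyError — a body without an 'index' key inside a
-- function with <2 bodies, or inside a binary left with <2 functions once its sparse functions are
-- gone — and (b) association lists with duplicate binary/function keys, which a Python dict cannot
-- even represent.
def Pre_filter_bad_dataset (all_data : List (String × List (String × List (List (String × Int))))) : Prop :=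
  (all_data.map Prod.fst).Nodup ∧
  ∀ p ∈ all_data, (p.2.map Prod.fst).Nodup ∧
    ∀ q ∈ p.2,
      (q.2.length < 2 ∨ p.2.countP (fun q' => 2 ≤ q'.2.length) < 2) →
        ∀ body ∈ q.2, "index" ∈ body.map Prod.fst
instance (all_data : List (String × List (String × List (List (String × Int))))) : Decidable (Pre_filter_bad_dataset all_data) := by unfold Pre_filter_bad_dataset; infer_instance

def pvWitness_filter_bad_dataset : (List (String × List (String × List (List (String × Int))))) :=
  [("b", [("f", [[("index", 1)], [("index", 2)]]), ("g", [[("index", 3)], [("index", 4)]])]),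
   ("c", [("f", [[("index", 5)]])])]

def Spec_filter_bad_dataset (all_data : List (String × List (String × List (List (String × Int))))) (out : (List (String × List (String × List (List (String × Int))))) × List Int) : Prop := out = filter_bad_dataset_alt all_data
instance (all_data : List (String × List (String × List (List (String × Int))))) (out : (List (String × List (String × List (List (String × Int))))) × List Int) : Decidable (Spec_filter_bad_dataset all_data out) := by
  unfold Spec_filter_bad_dataset
  letI d0 : DecidableEq (List (List (String × Int))) := instDecidableEqList
  letI d1 : DecidableEq (String × List (List (String × Int))) := instDecidableEqProd
  letI d2 : DecidableEq (List (String × List (List (String × Int)))) := instDecidableEqList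
  letI d3 : DecidableEq (String × List (String × List (List (String × Int)))) := instDecidableEqProd
  letI d4 : DecidableEq (List (String × List (String × List (List (String × Int))))) := instDecidableEqList
  letI d5 : DecidableEq ((List (String × List (String × List (List (String × Int))))) × List Int) := instDecidableEqProd
  exact d5 out (filter_bad_dataset_alt all_data)

-- ===== CLAIM (what is proved, stated in full; the proofs are below) =====
def Claim_equal_filter_bad_dataset : Prop := ∀ (all_data : List (String × List (String × List (List (String × Int))))), Dom_filter_bad_dataset all_data → Pre_filter_bad_dataset all_data → Spec_filter_bad_dataset all_data (filter_bad_dataset all_data)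

-- ===== LEMMAS AND PROOFS =====

-- the common specification both ports are reduced to
def pvBadF (fs : List (String × List (List (String × Int)))) : List (String × List (List (String × Int))) :=
  fs.filter (fun q => decide (q.2.length < 2))
def pvKeepF (fs : List (String × List (List (String × Int)))) : List (String × List (List (String × Int))) :=
  fs.filter (fun q => !decide (q.2.length < 2))
def pvFIdxs (fs : List (String × List (List (String × Int)))) : List Int :=
  fs.flatMap (fun q => q.2.map pvIdx)
def pvMd (d : List (String × List (String × List (List (String × Int))))) : List (String × List (String × List (List (String × Int)))) :=
  d.map (fun p => (p.1, pvKeepF p.2))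
def pvKeep (d : List (String × List (String × List (List (String × Int))))) : List (String × List (String × List (List (String × Int)))) :=
  (pvMd d).filter (fun p => !decide (p.2.length < 2))
def pvBadA (d : List (String × List (String × List (List (String × Int))))) : List Int :=
  d.flatMap (fun p => pvFIdxs (pvBadF p.2))
  ++ ((pvMd d).filter (fun p => decide (p.2.length < 2))).flatMap (fun p => pvFIdxs p.2)
def pvBadB (d : List (String × List (String × List (List (String × Int))))) : List Int :=
  d.flatMap (fun p => pvFIdxs (pvBadF p.2) ++ if (pvKeepF p.2).length < 2 then pvFIdxs (pvKeepF p.2) else [])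

-- ---- raw assoc-list facts about the Dict primitives used by the ports ----
theorem pvNodupSplitKeys (A B : List String) (k : String) (hnd : (A ++ k :: B).Nodup) :
    k ∉ A ∧ k ∉ B ∧ (A ++ B).Nodup := by
  rw [List.nodup_middle, List.nodup_cons] at hnd
  exact ⟨fun h => hnd.1 (List.mem_append_left _ h),
         fun h => hnd.1 (List.mem_append_right _ h), hnd.2⟩

theorem dGetD_cons_self {α : Type} (k : String) (v : α) (rest : List (String × α)) (d : α) :
    (PySem.Dict.mk ((k, v) :: rest)).getD k d = v := by
  simp [PySem.Dict.getD, PySem.Dict.get?]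

theorem dGetD_head {α : Type} (q : String × α) (rest : List (String × α)) (d : α) :
    (PySem.Dict.mk (q :: rest)).getD q.1 d = q.2 := by
  simp [PySem.Dict.getD, PySem.Dict.get?]

theorem dGetD_cons_skip {α : Type} (p : String × α) (rest : List (String × α)) (k : String) (d : α)
    (h : p.1 ≠ k) : (PySem.Dict.mk (p :: rest)).getD k d = (PySem.Dict.mk rest).getD k d := by
  simp [PySem.Dict.getD, PySem.Dict.get?, h]

theorem dGetD_append_skip {α : Type} (pre rest : List (String × α)) (k : String) (d : α)
    (h : ∀ r ∈ pre, r.1 ≠ k) :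
    (PySem.Dict.mk (pre ++ rest)).getD k d = (PySem.Dict.mk rest).getD k d := by
  have hn : pre.find? (fun p => p.1 == k) = none := by
    apply List.find?_eq_none.mpr
    intro x hx
    simpa using h x hx
  simp [PySem.Dict.getD, PySem.Dict.get?, List.find?_append, hn]

theorem dErase_items {α : Type} (l : List (String × α)) (k : String) :
    ((PySem.Dict.mk l).erase k).items = l.filter (fun p => !(p.1 == k)) := rfl

theorem dErase_middle {α : Type} (pre : List (String × α)) (q : String × α)
    (rest : List (String × α))
    (hpre : ∀ r ∈ pre, r.1 ≠ q.1) (hrest : ∀ r ∈ rest, r.1 ≠ q.1) :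
    ((PySem.Dict.mk (pre ++ q :: rest)).erase q.1).items = pre ++ rest := by
  rw [dErase_items, List.filter_append, List.filter_cons]
  rw [List.filter_eq_self.mpr (fun r hr => by simpa using hpre r hr),
      List.filter_eq_self.mpr (fun r hr => by simpa using hrest r hr)]
  simp

theorem dErase_cons_self {α : Type} (q : String × α) (rest : List (String × α))
    (hrest : ∀ r ∈ rest, r.1 ≠ q.1) :
    ((PySem.Dict.mk (q :: rest)).erase q.1).items = rest := by
  simpa using dErase_middle [] q rest (by simp) hrest

theorem dErase_cons_skip {α : Type} (p : String × α) (rest : List (String × α)) (k : String)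
    (h : p.1 ≠ k) :
    ((PySem.Dict.mk (p :: rest)).erase k).items = p :: ((PySem.Dict.mk rest).erase k).items := by
  rw [dErase_items, dErase_items, List.filter_cons]
  simp [h]

theorem dContains_of_mem {α : Type} (l : List (String × α)) (k : String)
    (h : k ∈ l.map Prod.fst) : (PySem.Dict.mk l).contains k = true := by
  simp only [PySem.Dict.contains, List.any_eq_true]
  rcases List.mem_map.mp h with ⟨r, hr, hk⟩
  exact ⟨r, hr, by simp [hk]⟩

theorem pvMapNoKey {α : Type} (l : List (String × α)) (k : String) (v : α)
    (h : ∀ r ∈ l, r.1 ≠ k) :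
    l.map (fun p => if (p.1 == k) = true then (k, v) else p) = l := by
  induction l with
  | nil => rfl
  | cons a l ih =>
    simp only [List.map_cons]
    rw [if_neg (by simpa using h a List.mem_cons_self)]
    rw [ih (fun r hr => h r (List.mem_cons_of_mem _ hr))]

theorem dInsert_middle {α : Type} (pre rest : List (String × α)) (q : String × α) (v : α)
    (hpre : ∀ r ∈ pre, r.1 ≠ q.1) (hrest : ∀ r ∈ rest, r.1 ≠ q.1) :
    ((PySem.Dict.mk (pre ++ q :: rest)).insert q.1 v).items = pre ++ (q.1, v) :: rest := by
  have hc : (PySem.Dict.mk (pre ++ q :: rest)).contains q.1 = true := by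
    apply dContains_of_mem
    simp only [List.map_append, List.map_cons]
    exact List.mem_append_right _ List.mem_cons_self
  have h2 : ((PySem.Dict.mk (pre ++ q :: rest)).insert q.1 v).items
      = (pre ++ q :: rest).map (fun p => if (p.1 == q.1) = true then (q.1, v) else p) := by
    simp [PySem.Dict.insert, hc]
  rw [h2, List.map_append, List.map_cons,
      pvMapNoKey pre q.1 v hpre, pvMapNoKey rest q.1 v hrest]
  simp

theorem dInsert_cons_selfK {α : Type} (k : String) (w : α) (rest : List (String × α)) (v : α)
    (hrest : ∀ r ∈ rest, r.1 ≠ k) :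
    ((PySem.Dict.mk ((k, w) :: rest)).insert k v).items = (k, v) :: rest := by
  simpa using dInsert_middle [] rest (k, w) v (by simp) hrest

theorem dInsert_keys_preserved {α : Type} (l : List (String × α)) (k : String) (v : α)
    (hc : (PySem.Dict.mk l).contains k = true) :
    ((PySem.Dict.mk l).insert k v).items.map Prod.fst = l.map Prod.fst := by
  have h2 : ((PySem.Dict.mk l).insert k v).items
      = l.map (fun p => if (p.1 == k) = true then (k, v) else p) := by
    simp [PySem.Dict.insert, hc]
  rw [h2, List.map_map]
  apply List.map_congr_left
  intro p _
  by_cases h : p.1 = k <;> simp [Function.comp, h]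

theorem dInsert_cons_skip {α : Type} (p : String × α) (rest : List (String × α)) (k : String)
    (v : α) (hne : p.1 ≠ k) (hc : k ∈ rest.map Prod.fst) :
    ((PySem.Dict.mk (p :: rest)).insert k v).items = p :: ((PySem.Dict.mk rest).insert k v).items := by
  have hc1 : (PySem.Dict.mk rest).contains k = true := dContains_of_mem rest k hc
  have hc2 : (PySem.Dict.mk (p :: rest)).contains k = true := by
    apply dContains_of_mem
    simp only [List.map_cons]
    exact List.mem_cons_of_mem _ hc
  have h2 : ((PySem.Dict.mk (p :: rest)).insert k v).items
      = (p :: rest).map (fun r => if (r.1 == k) = true then (k, v) else r) := by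
    simp [PySem.Dict.insert, hc2]
  have h3 : ((PySem.Dict.mk rest).insert k v).items
      = rest.map (fun r => if (r.1 == k) = true then (k, v) else r) := by
    simp [PySem.Dict.insert, hc1]
  rw [h2, h3, List.map_cons, if_neg (by simpa using hne)]

-- ---- fold shapes in the ports ----
theorem pvDblfold (fs : List (String × List (List (String × Int)))) (acc : List Int) :
    fs.foldl (fun acc q => q.2.foldl (fun acc body => acc ++ [pvIdx body]) acc) acc
      = acc ++ pvFIdxs fs := by
  rw [PySem.List.foldl_congr_mem fs _ (fun acc q => acc ++ q.2.map pvIdx) acc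
      (by intro acc q _; rw [PySem.List.foldl_append_singleton_eq_map])]
  rw [PySem.List.foldl_append_eq_flatMap]
  rfl

theorem pvBadfun_eq (d : List (String × List (String × List (List (String × Int))))) :
    d.foldl (fun acc p =>
        p.2.foldl (fun acc q => if q.2.length < 2 then acc ++ [(p.1, q.1)] else acc) acc) []
      = d.flatMap (fun p => (pvBadF p.2).map (fun q => (p.1, q.1))) := by
  rw [PySem.List.foldl_congr_mem d _ (fun acc p => acc ++ (pvBadF p.2).map (fun q => (p.1, q.1))) []
      (by intro acc p _; simp only [PySem.List.foldl_append_ite, pvBadF])]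
  rw [PySem.List.foldl_append_eq_flatMap]
  rfl

theorem pvBadbin_eq (md : List (String × List (String × List (List (String × Int))))) :
    md.foldl (fun acc p => if p.2.length < 2 then acc ++ [p.1] else acc) []
      = (md.filter (fun p => decide (p.2.length < 2))).map Prod.fst := by
  simp only [PySem.List.foldl_append_ite]
  rfl

-- ---- phase 2 of A ----
theorem pvPhase2_group (fs pre : List (String × List (List (String × Int)))) (b : String)
    (rest : List (String × List (String × List (List (String × Int))))) (acc : List Int)
    (hrest : ∀ r ∈ rest, r.1 ≠ b)
    (hnd : ((pre ++ fs).map Prod.fst).Nodup) :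
    ((pvBadF fs).map (fun q => (b, q.1))).foldl pvPhase2Step ((b, pre ++ fs) :: rest, acc)
      = ((b, pre ++ pvKeepF fs) :: rest, acc ++ pvFIdxs (pvBadF fs)) := by
  induction fs generalizing pre acc with
  | nil => simp [pvBadF, pvKeepF, pvFIdxs]
  | cons q fs ih =>
    have hsplit := pvNodupSplitKeys (pre.map Prod.fst) (fs.map Prod.fst) q.1
      (by simpa using hnd)
    have hpre : ∀ r ∈ pre, r.1 ≠ q.1 :=
      fun r hr he => hsplit.1 (List.mem_map.mpr ⟨r, hr, he⟩)
    have hfs : ∀ r ∈ fs, r.1 ≠ q.1 :=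
      fun r hr he => hsplit.2.1 (List.mem_map.mpr ⟨r, hr, he⟩)
    have hnd' : ((pre ++ fs).map Prod.fst).Nodup := by
      simp only [List.map_append]
      exact hsplit.2.2
    by_cases hq : q.2.length < 2
    · have hbf : pvBadF (q :: fs) = q :: pvBadF fs := by
        simp [pvBadF, List.filter_cons]; omega
      have hkf : pvKeepF (q :: fs) = pvKeepF fs := by
        simp [pvKeepF, List.filter_cons]; omega
      rw [hbf]
      simp only [List.map_cons, List.foldl_cons]
      have hstep : pvPhase2Step ((b, pre ++ q :: fs) :: rest, acc) (b, q.1)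
          = ((b, pre ++ fs) :: rest, acc ++ q.2.map pvIdx) := by
        simp only [pvPhase2Step]
        rw [dGetD_cons_self b (pre ++ q :: fs) rest []]
        rw [dGetD_append_skip pre (q :: fs) q.1 [] hpre]
        rw [dGetD_head q fs []]
        rw [PySem.List.foldl_append_singleton_eq_map]
        rw [dErase_middle pre q fs hpre hfs]
        rw [dInsert_cons_selfK b (pre ++ q :: fs) rest (pre ++ fs) hrest]
      rw [hstep]
      rw [ih pre (acc ++ q.2.map pvIdx) hnd']
      rw [hkf]
      simp [pvFIdxs, List.flatMap_cons, List.append_assoc]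
    · have hbf : pvBadF (q :: fs) = pvBadF fs := by
        simp [pvBadF, List.filter_cons]; omega
      have hkf : pvKeepF (q :: fs) = q :: pvKeepF fs := by
        simp [pvKeepF, List.filter_cons]; omega
      rw [hbf]
      rw [show pre ++ q :: fs = (pre ++ [q]) ++ fs by simp]
      rw [ih (pre ++ [q]) acc (by simpa using hnd)]
      rw [hkf]
      simp

theorem pvPhase2_skip (l : List (String × String))
    (p : String × List (String × List (List (String × Int))))
    (rest : List (String × List (String × List (List (String × Int))))) (acc : List Int)
    (hne : ∀ bf ∈ l, bf.1 ≠ p.1) (hmem : ∀ bf ∈ l, bf.1 ∈ rest.map Prod.fst) :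
    l.foldl pvPhase2Step (p :: rest, acc)
      = (p :: (l.foldl pvPhase2Step (rest, acc)).1, (l.foldl pvPhase2Step (rest, acc)).2) := by
  induction l generalizing rest acc with
  | nil => simp
  | cons bf l ih =>
    simp only [List.foldl_cons]
    have h1 : bf.1 ≠ p.1 := hne bf List.mem_cons_self
    have h2 : bf.1 ∈ rest.map Prod.fst := hmem bf List.mem_cons_self
    have hstep : pvPhase2Step (p :: rest, acc) bf
        = (p :: (pvPhase2Step (rest, acc) bf).1, (pvPhase2Step (rest, acc) bf).2) := by
      simp only [pvPhase2Step]
      rw [dGetD_cons_skip p rest bf.1 [] (Ne.symm h1)]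
      rw [dInsert_cons_skip p rest bf.1 _ (Ne.symm h1) h2]
    rw [hstep]
    rw [ih (pvPhase2Step (rest, acc) bf).1 (pvPhase2Step (rest, acc) bf).2
        (fun x hx => hne x (List.mem_cons_of_mem _ hx))
        (fun x hx => by
          have hk : ((pvPhase2Step (rest, acc) bf).1).map Prod.fst = rest.map Prod.fst := by
            simp only [pvPhase2Step]
            exact dInsert_keys_preserved rest bf.1 _ (dContains_of_mem rest bf.1 h2)
          rw [hk]
          exact hmem x (List.mem_cons_of_mem _ hx))]

theorem pvPhase2_main (d : List (String × List (String × List (List (String × Int))))) (acc : List Int)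
    (hnd : (d.map Prod.fst).Nodup) (hfs : ∀ p ∈ d, (p.2.map Prod.fst).Nodup) :
    (d.flatMap (fun p => (pvBadF p.2).map (fun q => (p.1, q.1)))).foldl pvPhase2Step (d, acc)
      = (pvMd d, acc ++ d.flatMap (fun p => pvFIdxs (pvBadF p.2))) := by
  induction d generalizing acc with
  | nil => simp [pvMd]
  | cons p rest ih =>
    simp only [List.flatMap_cons, List.foldl_append]
    have hndr : (rest.map Prod.fst).Nodup := by
      simp only [List.map_cons, List.nodup_cons] at hnd; exact hnd.2
    have hp1 : p.1 ∉ rest.map Prod.fst := by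
      simp only [List.map_cons, List.nodup_cons] at hnd; exact hnd.1
    have hgrp := pvPhase2_group p.2 [] p.1 rest acc
      (fun r hr he => hp1 (List.mem_map.mpr ⟨r, hr, he⟩))
      (by simpa using hfs p List.mem_cons_self)
    simp only [List.nil_append, Prod.mk.eta] at hgrp
    rw [hgrp]
    have hskip := pvPhase2_skip (rest.flatMap (fun p => (pvBadF p.2).map (fun q => (p.1, q.1))))
      (p.1, pvKeepF p.2) rest (acc ++ pvFIdxs (pvBadF p.2))
      (by intro bf hbf
          simp only [List.mem_flatMap, List.mem_map] at hbf
          rcases hbf with ⟨r, hr, q, _, hq⟩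
          intro he
          exact hp1 (by rw [← he, ← hq]; exact List.mem_map.mpr ⟨r, hr, rfl⟩))
      (by intro bf hbf
          simp only [List.mem_flatMap, List.mem_map] at hbf
          rcases hbf with ⟨r, hr, q, _, hq⟩
          rw [← hq]
          exact List.mem_map.mpr ⟨r, hr, rfl⟩)
    rw [hskip]
    rw [ih (acc ++ pvFIdxs (pvBadF p.2)) hndr (fun x hx => hfs x (List.mem_cons_of_mem _ hx))]
    simp [pvMd, List.append_assoc]

-- ---- phase 4 of A ----
theorem pvPhase4_skip (l : List String)
    (p : String × List (String × List (List (String × Int))))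
    (rest : List (String × List (String × List (List (String × Int))))) (acc : List Int)
    (hne : ∀ b ∈ l, b ≠ p.1) :
    l.foldl pvPhase4Step (p :: rest, acc)
      = (p :: (l.foldl pvPhase4Step (rest, acc)).1, (l.foldl pvPhase4Step (rest, acc)).2) := by
  induction l generalizing rest acc with
  | nil => simp
  | cons b l ih =>
    simp only [List.foldl_cons]
    have h1 : b ≠ p.1 := hne b List.mem_cons_self
    have hstep : pvPhase4Step (p :: rest, acc) b
        = (p :: (pvPhase4Step (rest, acc) b).1, (pvPhase4Step (rest, acc) b).2) := by
      simp only [pvPhase4Step]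
      rw [dGetD_cons_skip p rest b [] (Ne.symm h1)]
      rw [dErase_cons_skip p rest b (Ne.symm h1)]
    rw [hstep]
    rw [ih (pvPhase4Step (rest, acc) b).1 (pvPhase4Step (rest, acc) b).2
        (fun x hx => hne x (List.mem_cons_of_mem _ hx))]

theorem pvPhase4_main (md : List (String × List (String × List (List (String × Int))))) (acc : List Int)
    (hnd : (md.map Prod.fst).Nodup) :
    ((md.filter (fun p => decide (p.2.length < 2))).map Prod.fst).foldl pvPhase4Step (md, acc)
      = (md.filter (fun p => !decide (p.2.length < 2)),
         acc ++ (md.filter (fun p => decide (p.2.length < 2))).flatMap (fun p => pvFIdxs p.2)) := by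
  induction md generalizing acc with
  | nil => simp
  | cons p rest ih =>
    have hndr : (rest.map Prod.fst).Nodup := by
      simp only [List.map_cons, List.nodup_cons] at hnd; exact hnd.2
    have hp1 : p.1 ∉ rest.map Prod.fst := by
      simp only [List.map_cons, List.nodup_cons] at hnd; exact hnd.1
    by_cases hq : p.2.length < 2
    · simp only [List.filter_cons, hq, decide_true, if_true, Bool.not_true, List.map_cons,
        List.foldl_cons, List.flatMap_cons]
      have hstep : pvPhase4Step (p :: rest, acc) p.1 = (rest, acc ++ pvFIdxs p.2) := by
        simp only [pvPhase4Step]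
        rw [dGetD_head p rest []]
        rw [pvDblfold]
        rw [dErase_cons_self p rest (fun r hr he => hp1 (List.mem_map.mpr ⟨r, hr, he⟩))]
      rw [hstep, ih (acc ++ pvFIdxs p.2) hndr]
      simp [List.append_assoc]
    · simp only [List.filter_cons, hq, decide_false, Bool.false_eq_true, if_false, Bool.not_false]
      rw [pvPhase4_skip ((rest.filter (fun p => decide (p.2.length < 2))).map Prod.fst) p rest acc
        (by intro b hb
            simp only [List.mem_map, List.mem_filter] at hb
            rcases hb with ⟨r, ⟨hr, _⟩, he⟩
            intro hc
            exact hp1 (by rw [← hc, ← he]; exact List.mem_map.mpr ⟨r, hr, rfl⟩))]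
      rw [ih acc hndr]
      simp

-- A reduced to the specification
theorem pvA_char (d : List (String × List (String × List (List (String × Int)))))
    (hnd : (d.map Prod.fst).Nodup) (hfs : ∀ p ∈ d, (p.2.map Prod.fst).Nodup) :
    filter_bad_dataset d
      = (pvKeep d, PySem.List.sorted (PySem.Set.ofList (pvBadA d)) (fun x => x) true) := by
  unfold filter_bad_dataset
  dsimp only
  rw [pvBadfun_eq]
  rw [pvPhase2_main d [] hnd hfs]
  dsimp only
  rw [pvBadbin_eq]
  rw [pvPhase4_main (pvMd d) _ (by simpa [pvMd, List.map_map, Function.comp] using hnd)]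
  simp [pvKeep, pvBadA]

-- ---- B's single pass ----
theorem pvAddIdxs_eq (s : PySem.Set Int) (bodies : List (List (String × Int))) :
    pvAddIdxs s bodies = PySem.Set.update s (bodies.map pvIdx) := by
  unfold pvAddIdxs PySem.Set.update
  rw [List.foldl_map]

theorem pvSetfold (fs : List (String × List (List (String × Int)))) (s : PySem.Set Int) :
    fs.foldl (fun s q => pvAddIdxs s q.2) s = PySem.Set.update s (pvFIdxs fs) := by
  induction fs generalizing s with
  | nil => simp [PySem.Set.update, pvFIdxs]
  | cons q fs ih =>
    simp only [List.foldl_cons]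
    rw [pvAddIdxs_eq, ih]
    simp [pvFIdxs, PySem.Set.update, List.flatMap_cons, List.foldl_append]

theorem pvAltInner (fs pre : List (String × List (List (String × Int)))) (s : PySem.Set Int)
    (hnd : ((pre ++ fs).map Prod.fst).Nodup) :
    fs.foldl pvAltInnerStep (pre ++ fs, s)
      = (pre ++ pvKeepF fs, PySem.Set.update s (pvFIdxs (pvBadF fs))) := by
  induction fs generalizing pre s with
  | nil => simp [pvKeepF, pvBadF, pvFIdxs, PySem.Set.update]
  | cons q fs ih =>
    have hsplit := pvNodupSplitKeys (pre.map Prod.fst) (fs.map Prod.fst) q.1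
      (by simpa using hnd)
    have hpre : ∀ r ∈ pre, r.1 ≠ q.1 :=
      fun r hr he => hsplit.1 (List.mem_map.mpr ⟨r, hr, he⟩)
    have hfs : ∀ r ∈ fs, r.1 ≠ q.1 :=
      fun r hr he => hsplit.2.1 (List.mem_map.mpr ⟨r, hr, he⟩)
    simp only [List.foldl_cons]
    by_cases hq : q.2.length < 2
    · have hstep : pvAltInnerStep (pre ++ q :: fs, s) q = (pre ++ fs, pvAddIdxs s q.2) := by
        simp only [pvAltInnerStep, hq, if_true]
        rw [dErase_middle pre q fs hpre hfs]
      rw [hstep]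
      have hnd' : ((pre ++ fs).map Prod.fst).Nodup := by
        simp only [List.map_append]; exact hsplit.2.2
      rw [ih pre (pvAddIdxs s q.2) hnd']
      rw [pvAddIdxs_eq]
      have hbf : pvBadF (q :: fs) = q :: pvBadF fs := by simp [pvBadF, List.filter_cons]; omega
      have hkf : pvKeepF (q :: fs) = pvKeepF fs := by simp [pvKeepF, List.filter_cons]; omega
      rw [hbf, hkf]
      simp [pvFIdxs, List.flatMap_cons, PySem.Set.update, List.foldl_append]
    · have hstep : pvAltInnerStep (pre ++ q :: fs, s) q = (pre ++ q :: fs, s) := by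
        simp [pvAltInnerStep, hq]
      rw [hstep]
      rw [show pre ++ q :: fs = (pre ++ [q]) ++ fs by simp]
      rw [ih (pre ++ [q]) s (by simpa using hnd)]
      have hbf : pvBadF (q :: fs) = pvBadF fs := by simp [pvBadF, List.filter_cons]; omega
      have hkf : pvKeepF (q :: fs) = q :: pvKeepF fs := by simp [pvKeepF, List.filter_cons]; omega
      rw [hbf, hkf]
      simp

theorem pvAltOuter (l pre : List (String × List (String × List (List (String × Int)))))
    (s : PySem.Set Int)
    (hnd : (pre.map Prod.fst ++ l.map Prod.fst).Nodup)
    (hfs : ∀ p ∈ l, (p.2.map Prod.fst).Nodup) :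
    l.foldl pvAltStep (pre ++ l, s) = (pre ++ pvKeep l, PySem.Set.update s (pvBadB l)) := by
  induction l generalizing pre s with
  | nil => simp [pvKeep, pvMd, pvBadB, PySem.Set.update]
  | cons p rest ih =>
    have hsplit := pvNodupSplitKeys (pre.map Prod.fst) (rest.map Prod.fst) p.1
      (by simpa using hnd)
    have hpre : ∀ r ∈ pre, r.1 ≠ p.1 :=
      fun r hr he => hsplit.1 (List.mem_map.mpr ⟨r, hr, he⟩)
    have hrest : ∀ r ∈ rest, r.1 ≠ p.1 :=
      fun r hr he => hsplit.2.1 (List.mem_map.mpr ⟨r, hr, he⟩)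
    simp only [List.foldl_cons]
    have hinner : p.2.foldl pvAltInnerStep (p.2, s)
        = (pvKeepF p.2, PySem.Set.update s (pvFIdxs (pvBadF p.2))) := by
      have h := pvAltInner p.2 [] s (by simpa using hfs p List.mem_cons_self)
      simpa using h
    by_cases hk : (pvKeepF p.2).length < 2
    · have hstep : pvAltStep (pre ++ p :: rest, s) p
          = (pre ++ rest,
             PySem.Set.update (PySem.Set.update s (pvFIdxs (pvBadF p.2))) (pvFIdxs (pvKeepF p.2))) := by
        simp only [pvAltStep, hinner, hk, if_true]
        rw [dErase_middle pre p rest hpre hrest]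
        rw [pvSetfold]
      rw [hstep]
      have hnd' : (pre.map Prod.fst ++ rest.map Prod.fst).Nodup := hsplit.2.2
      rw [ih pre _ hnd' (fun x hx => hfs x (List.mem_cons_of_mem _ hx))]
      have hK : pvKeep (p :: rest) = pvKeep rest := by
        simp [pvKeep, pvMd, List.filter_cons]; omega
      have hB : pvBadB (p :: rest)
          = (pvFIdxs (pvBadF p.2) ++ pvFIdxs (pvKeepF p.2)) ++ pvBadB rest := by
        simp [pvBadB, List.flatMap_cons]; omega
      rw [hK, hB]
      simp [PySem.Set.update, List.foldl_append]
    · have hstep : pvAltStep (pre ++ p :: rest, s) p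
          = (pre ++ (p.1, pvKeepF p.2) :: rest, PySem.Set.update s (pvFIdxs (pvBadF p.2))) := by
        simp only [pvAltStep, hinner, hk, if_false]
        rw [dInsert_middle pre rest p (pvKeepF p.2) hpre hrest]
      rw [hstep]
      rw [show pre ++ (p.1, pvKeepF p.2) :: rest = (pre ++ [(p.1, pvKeepF p.2)]) ++ rest by simp]
      have hnd' : ((pre ++ [(p.1, pvKeepF p.2)]).map Prod.fst ++ rest.map Prod.fst).Nodup := by
        simp only [List.map_append, List.map_cons, List.map_nil]
        simpa using hnd
      rw [ih (pre ++ [(p.1, pvKeepF p.2)]) _ hnd' (fun x hx => hfs x (List.mem_cons_of_mem _ hx))]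
      have hK : pvKeep (p :: rest) = (p.1, pvKeepF p.2) :: pvKeep rest := by
        simp [pvKeep, pvMd, List.filter_cons]; omega
      have hB : pvBadB (p :: rest) = pvFIdxs (pvBadF p.2) ++ pvBadB rest := by
        simp [pvBadB, List.flatMap_cons]; omega
      rw [hK, hB]
      simp [PySem.Set.update, List.foldl_append]

theorem pvB_char (d : List (String × List (String × List (List (String × Int)))))
    (hnd : (d.map Prod.fst).Nodup) (hfs : ∀ p ∈ d, (p.2.map Prod.fst).Nodup) :
    filter_bad_dataset_alt d
      = (pvKeep d, PySem.List.sorted (PySem.Set.ofList (pvBadB d)) (fun x => x) true) := by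
  unfold filter_bad_dataset_alt
  dsimp only
  have h := pvAltOuter d [] PySem.Set.empty (by simpa using hnd) hfs
  try simp only [List.nil_append] at h
  rw [h]
  simp [PySem.Set.update, PySem.Set.ofList]

-- ---- the two collected index lists have the same elements ----
theorem pvBad_mem (d : List (String × List (String × List (List (String × Int))))) (x : Int) :
    x ∈ pvBadA d ↔ x ∈ pvBadB d := by
  simp only [pvBadA, pvBadB, pvMd, List.mem_append, List.mem_flatMap, List.mem_filter,
    List.mem_map]
  constructor
  · rintro (⟨p, hp, hx⟩ | ⟨q, ⟨⟨p, hp, rfl⟩, hlen⟩, hx⟩)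
    · exact ⟨p, hp, by simp [hx]⟩
    · refine ⟨p, hp, ?_⟩
      simp only [decide_eq_true_eq] at hlen
      simp [hlen, hx]
  · rintro ⟨p, hp, hx⟩
    try simp only [List.mem_append] at hx
    rcases hx with hx | hx
    · exact Or.inl ⟨p, hp, hx⟩
    · by_cases hlen : (pvKeepF p.2).length < 2
      · refine Or.inr ⟨(p.1, pvKeepF p.2), ⟨⟨p, hp, rfl⟩, by simp [hlen]⟩, ?_⟩
        simpa [hlen] using hx
      · simp [hlen] at hx

-- sorted(set(xs), reverse=True) depends only on the elements of xs
theorem pvSorted_set_eq (xs ys : List Int) (h : ∀ x, x ∈ xs ↔ x ∈ ys) :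
    PySem.List.sorted (PySem.Set.ofList xs) (fun x => x) true
      = PySem.List.sorted (PySem.Set.ofList ys) (fun x => x) true := by
  have hmx : ∀ x, x ∈ PySem.Set.ofList xs ↔ x ∈ PySem.Set.ofList ys := by
    intro x
    rw [PySem.Set.mem_ofList, PySem.Set.mem_ofList, h]
  have hnx : (PySem.Set.ofList xs).Nodup := PySem.Set.nodup_ofList xs
  have hny : (PySem.Set.ofList ys).Nodup := PySem.Set.nodup_ofList ys
  have hperm : (PySem.Set.ofList xs).Perm (PySem.Set.ofList ys) :=
    (List.perm_ext_iff_of_nodup hnx hny).mpr hmx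
  have hsp : (PySem.List.sorted (PySem.Set.ofList xs) (fun x => x) true).Perm (PySem.Set.ofList ys) :=
    (PySem.List.sorted_perm _ _ _).trans hperm
  have hle : (PySem.List.sorted (PySem.Set.ofList xs) (fun x => x) true).Pairwise
      (fun a b : Int => b ≤ a) := PySem.List.sorted_pairwise_rev _ _
  have hnd : (PySem.List.sorted (PySem.Set.ofList xs) (fun x => x) true).Nodup :=
    ((PySem.List.sorted_perm _ _ _).nodup_iff).mpr hnx
  have hlt : (PySem.List.sorted (PySem.Set.ofList xs) (fun x => x) true).Pairwise
      (fun a b : Int => b < a) := by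
    have hand := List.Pairwise.and hle hnd
    exact hand.imp (fun hab => by omega)
  exact (PySem.List.sorted_rev_eq_of_perm_of_pairwise_gt (PySem.Set.ofList ys)
    (PySem.List.sorted (PySem.Set.ofList xs) (fun x => x) true) (fun x => x) hsp hlt).symm

-- ===== VERDICT (by name: the statement is the Claim_ definition above) =====
theorem filter_bad_dataset_spec : Claim_equal_filter_bad_dataset := by
  intro d _ hpre
  unfold Spec_filter_bad_dataset
  obtain ⟨hnd, hrest⟩ := hpre
  have hfs : ∀ p ∈ d, (p.2.map Prod.fst).Nodup := fun p hp => (hrest p hp).1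
  rw [pvA_char d hnd hfs, pvB_char d hnd hfs]
  rw [pvSorted_set_eq (pvBadA d) (pvBadB d) (pvBad_mem d)]
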